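-- pv_equiv track=rewrite | github.com/genaforvena/josef_kkk | main.py | paragraph_generator
-- ===== SOURCE A (Python) =====
-- def paragraph_generator(text_stream):
--     paragraph = ""
--     for chunk in text_stream:
--         paragraph += chunk
--         if '\n\n' in paragraph:
--             parts = paragraph.split('\n\n')
--             for part in parts[:-1]:
--                 yield part.strip()
--             paragraph = parts[-1]
--     if paragraph:
--         yield paragraph.strip()
-- ===== SOURCE B (Python) =====
-- def paragraph_generator(text_stream):
--     parts = "".join(text_stream).split('\n\n')
--     for part in parts[:-1]:
--         yield part.strip()
--     if parts[-1]:
--         yield parts[-1].strip()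
-- ===== Notes on version B (the rewrite author's own statement) =====
-- stated objective: faster
-- what changed: A accumulates a buffer chunk by chunk and rescans/resplits it after every chunk; B joins the whole stream once and does a single split on '\n\n', emitting the stripped parts directly.
import Mathlib
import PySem

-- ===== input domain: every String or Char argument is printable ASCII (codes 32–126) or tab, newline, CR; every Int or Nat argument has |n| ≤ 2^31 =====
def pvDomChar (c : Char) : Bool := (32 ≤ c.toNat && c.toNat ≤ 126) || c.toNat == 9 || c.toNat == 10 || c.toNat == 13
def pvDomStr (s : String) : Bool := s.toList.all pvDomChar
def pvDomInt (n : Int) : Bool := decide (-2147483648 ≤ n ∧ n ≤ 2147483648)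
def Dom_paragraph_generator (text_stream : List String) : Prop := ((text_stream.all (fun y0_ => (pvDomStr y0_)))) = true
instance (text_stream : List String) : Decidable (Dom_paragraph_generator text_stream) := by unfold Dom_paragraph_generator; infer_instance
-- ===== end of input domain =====

-- B replaces A's repeated buffer-append-and-rescan (quadratic in the worst case) by one
-- join of the whole stream and a single split on '\n\n'; equivalence of the return value
-- (the yielded sequence) is proved for all inputs.

-- strip a paragraph and pack it back into a String (used by both ports; = `part.strip()`)
def pvStrip (p : List Char) : String := String.ofList (PySem.Chars.strip p)

-- ===== PORT A =====
-- loop body: paragraph += chunk; if '\n\n' in paragraph: yield the stripped parts[:-1], keep parts[-1]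
def pvStepA (st : List String × List Char) (chunk : String) : List String × List Char :=
  let para := st.2 ++ chunk.toList
  if PySem.Chars.isIn ['\n', '\n'] para then
    let parts := PySem.Chars.splitOn para ['\n', '\n']
    (st.1 ++ parts.dropLast.map pvStrip, parts.getLast!)
  else
    (st.1, para)

def paragraph_generator (text_stream : List String) : List String :=
  let r := text_stream.foldl pvStepA ([], [])
  if r.2 ≠ [] then r.1 ++ [pvStrip r.2] else r.1

-- ===== PORT B =====
def paragraph_generator_alt (text_stream : List String) : List String :=
  let parts := PySem.Chars.splitOn (PySem.Chars.join [] (text_stream.map String.toList)) ['\n', '\n']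
  parts.dropLast.map pvStrip ++
    (if parts.getLast! ≠ [] then [pvStrip parts.getLast!] else [])

-- ===== PRECONDITION & SPEC =====
def Spec_paragraph_generator (text_stream : List String) (out : List String) : Prop := out = paragraph_generator_alt text_stream
instance (text_stream : List String) (out : List String) : Decidable (Spec_paragraph_generator text_stream out) := by unfold Spec_paragraph_generator; infer_instance

-- ===== CLAIM (what is proved, stated in full; the proofs are below) =====
def Claim_equal_paragraph_generator : Prop := ∀ (text_stream : List String), Dom_paragraph_generator text_stream → Spec_paragraph_generator text_stream (paragraph_generator text_stream)

-- ===== LEMMAS AND PROOFS =====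

theorem pv_go_shape (sep : List Char) : ∀ (fuel : Nat) (l : List Char),
    ∃ h t, PySem.Chars.splitOn.go sep fuel l [] [] = h :: t ∧
      ∀ cur acc, PySem.Chars.splitOn.go sep fuel l cur acc = acc.reverse ++ (cur.reverse ++ h) :: t := by
  intro fuel
  induction fuel with
  | zero =>
    intro l
    exact ⟨l, [], by simp [PySem.Chars.splitOn.go], by intro cur acc; simp [PySem.Chars.splitOn.go]⟩
  | succ f ih =>
    intro l
    match l with
    | [] => exact ⟨[], [], by simp [PySem.Chars.splitOn.go], by intro cur acc; simp [PySem.Chars.splitOn.go]⟩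
    | c :: rest =>
      by_cases hp : sep.isPrefixOf (c :: rest) = true
      · obtain ⟨h', t', h1, h2⟩ := ih (List.drop sep.length (c :: rest))
        refine ⟨[], h' :: t', ?_, ?_⟩
        · simp only [PySem.Chars.splitOn.go, hp, if_pos]
          rw [h2]; simp
        · intro cur acc
          simp only [PySem.Chars.splitOn.go, hp, if_pos]
          rw [h2]; simp
      · obtain ⟨h', t', h1, h2⟩ := ih rest
        refine ⟨c :: h', t', ?_, ?_⟩
        · simp only [PySem.Chars.splitOn.go, hp]
          rw [h2]; simp
        · intro cur acc
          simp only [PySem.Chars.splitOn.go, hp]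
          rw [h2]; simp

theorem pv_go_fuel (sep : List Char) (hs : sep ≠ []) : ∀ (f g : Nat) (l : List Char),
    l.length < f → l.length < g →
    PySem.Chars.splitOn.go sep f l [] [] = PySem.Chars.splitOn.go sep g l [] [] := by
  intro f
  induction f with
  | zero => intro g l hf; omega
  | succ f ih =>
    intro g l hf hg
    match g, hg with
    | g + 1, hg =>
    match l with
    | [] => simp [PySem.Chars.splitOn.go]
    | c :: rest =>
      have hsep : 0 < sep.length := List.length_pos_of_ne_nil hs
      by_cases hp : sep.isPrefixOf (c :: rest) = true
      · simp only [PySem.Chars.splitOn.go, hp, if_pos]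
        obtain ⟨h1, t1, e1, w1⟩ := pv_go_shape sep f (List.drop sep.length (c :: rest))
        obtain ⟨h2, t2, e2, w2⟩ := pv_go_shape sep g (List.drop sep.length (c :: rest))
        rw [w1, w2]
        have : PySem.Chars.splitOn.go sep f (List.drop sep.length (c :: rest)) [] [] =
            PySem.Chars.splitOn.go sep g (List.drop sep.length (c :: rest)) [] [] := by
          apply ih <;> simp [List.length_drop] <;> simp at hf hg <;> omega
        rw [e1, e2] at this
        simp_all
      · simp only [PySem.Chars.splitOn.go, hp]
        obtain ⟨h1, t1, e1, w1⟩ := pv_go_shape sep f rest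
        obtain ⟨h2, t2, e2, w2⟩ := pv_go_shape sep g rest
        rw [w1, w2]
        have : PySem.Chars.splitOn.go sep f rest [] [] = PySem.Chars.splitOn.go sep g rest [] [] := by
          apply ih <;> simp at hf hg <;> omega
        rw [e1, e2] at this
        simp_all

theorem pv_split_sep (t : List Char) :
    PySem.Chars.splitOn ('\n' :: '\n' :: t) ['\n', '\n'] = [] :: PySem.Chars.splitOn t ['\n', '\n'] := by
  show PySem.Chars.splitOn.go _ _ _ _ _ = _
  simp only [List.length_cons]
  rw [show t.length + 1 + 1 + 1 = (t.length + 1 + 1) + 1 from rfl]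
  simp only [PySem.Chars.splitOn.go, show (['\n','\n'] : List Char).isPrefixOf ('\n' :: '\n' :: t) = true by simp [List.isPrefixOf]]
  obtain ⟨h, t', e, w⟩ := pv_go_shape ['\n','\n'] (t.length + 1 + 1) t
  have hd : List.drop (['\n','\n'] : List Char).length ('\n' :: '\n' :: t) = t := rfl
  rw [hd, w]
  have : PySem.Chars.splitOn.go ['\n','\n'] (t.length + 1 + 1) t [] [] =
      PySem.Chars.splitOn.go ['\n','\n'] (t.length + 1) t [] [] :=
    pv_go_fuel _ (by simp) _ _ _ (by omega) (by omega)
  rw [e] at this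
  show _ = [] :: PySem.Chars.splitOn.go _ _ _ _ _
  rw [← this]
  simp

def pvMapHead (c : Char) : List (List Char) → List (List Char)
  | [] => []
  | h :: t => (c :: h) :: t

theorem pv_split_cons (c : Char) (t : List Char)
    (hp : ¬ (['\n', '\n'] : List Char).isPrefixOf (c :: t) = true) :
    PySem.Chars.splitOn (c :: t) ['\n', '\n'] = pvMapHead c (PySem.Chars.splitOn t ['\n', '\n']) := by
  show PySem.Chars.splitOn.go _ _ _ _ _ = _
  simp only [List.length_cons]
  simp only [PySem.Chars.splitOn.go, hp, Bool.false_eq_true]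
  obtain ⟨h, t', e, w⟩ := pv_go_shape ['\n','\n'] (t.length + 1) t
  rw [w]
  show _ = pvMapHead c (PySem.Chars.splitOn.go _ _ _ _ _)
  rw [e]
  simp [pvMapHead]

theorem pv_splitOn_ne_nil (l sep : List Char) : PySem.Chars.splitOn l sep ≠ [] := by
  obtain ⟨h, t, e, _⟩ := pv_go_shape sep (l.length + 1) l
  show PySem.Chars.splitOn.go _ _ _ _ _ ≠ []
  simp [e]

theorem pv_split_singleton : ∀ (l p : List Char),
    PySem.Chars.splitOn l ['\n', '\n'] = [p] → p = l := by
  intro l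
  induction l with
  | nil =>
    intro p h
    rw [show PySem.Chars.splitOn ([] : List Char) ['\n', '\n'] = [[]] from rfl] at h
    injection h with h1 _
    exact h1.symm
  | cons c t ih =>
    intro p h
    by_cases hp : (['\n', '\n'] : List Char).isPrefixOf (c :: t) = true
    · match t, hp with
      | [], hp => simp [List.isPrefixOf] at hp
      | d :: t2, hp =>
        simp [List.isPrefixOf] at hp
        obtain ⟨rfl, rfl⟩ := hp
        rw [pv_split_sep t2] at h
        have hne := pv_splitOn_ne_nil t2 (['\n', '\n'] : List Char)
        simp at h
        exact absurd h.2 hne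
    · rw [pv_split_cons c t hp] at h
      obtain ⟨h1, t1, e⟩ : ∃ h1 t1, PySem.Chars.splitOn t ['\n','\n'] = h1 :: t1 := by
        rcases hx : PySem.Chars.splitOn t ['\n','\n'] with _ | ⟨h1, t1⟩
        · exact absurd hx (pv_splitOn_ne_nil t _)
        · exact ⟨h1, t1, rfl⟩
      rw [e] at h
      simp [pvMapHead] at h
      obtain ⟨rfl, rfl⟩ := h
      rw [ih h1 (by rw [e])]

theorem pv_noSep_split (l : List Char) (h : PySem.Chars.isIn ['\n', '\n'] l = false) :
    PySem.Chars.splitOn l ['\n', '\n'] = [l] := by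
  induction l with
  | nil => rfl
  | cons c t ih =>
    rw [PySem.Chars.isIn_eq_false_iff, List.infix_cons_iff, not_or] at h
    obtain ⟨hnp, hni⟩ := h
    have hp : ¬ (['\n', '\n'] : List Char).isPrefixOf (c :: t) = true := by
      rw [List.isPrefixOf_iff_prefix]; exact hnp
    rw [pv_split_cons c t hp, ih (by rw [PySem.Chars.isIn_eq_false_iff]; exact hni)]
    rfl

theorem pv_last_noSep : ∀ (n : Nat) (l : List Char), l.length ≤ n →
    PySem.Chars.isIn ['\n', '\n'] (PySem.Chars.splitOn l ['\n', '\n']).getLast! = false := by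
  intro n
  induction n with
  | zero =>
    intro l hl
    have : l = [] := List.eq_nil_of_length_eq_zero (by omega)
    subst this; decide
  | succ n ih =>
    intro l hl
    match l with
    | [] => decide
    | c :: t =>
      by_cases hp : (['\n', '\n'] : List Char).isPrefixOf (c :: t) = true
      · match t, hp with
        | [], hp => simp [List.isPrefixOf] at hp
        | d :: t2, hp =>
          simp [List.isPrefixOf] at hp
          obtain ⟨rfl, rfl⟩ := hp
          rw [pv_split_sep t2]
          obtain ⟨h1, t1, e⟩ : ∃ h1 t1, PySem.Chars.splitOn t2 ['\n','\n'] = h1 :: t1 := by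
            rcases hx : PySem.Chars.splitOn t2 ['\n','\n'] with _ | ⟨h1, t1⟩
            · exact absurd hx (pv_splitOn_ne_nil t2 _)
            · exact ⟨h1, t1, rfl⟩
          rw [e]
          rw [show ([] :: h1 :: t1).getLast! = (h1 :: t1).getLast! from rfl, ← e]
          apply ih
          simp at hl ⊢; omega
      · rw [pv_split_cons c t hp]
        obtain ⟨h1, t1, e⟩ : ∃ h1 t1, PySem.Chars.splitOn t ['\n','\n'] = h1 :: t1 := by
          rcases hx : PySem.Chars.splitOn t ['\n','\n'] with _ | ⟨h1, t1⟩
          · exact absurd hx (pv_splitOn_ne_nil t _)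
          · exact ⟨h1, t1, rfl⟩
        rw [e]
        match t1 with
        | [] =>
          have hht : h1 = t := pv_split_singleton t h1 (by rw [e])
          subst hht
          show PySem.Chars.isIn _ [c :: h1].getLast! = false
          have : [c :: h1].getLast! = c :: h1 := rfl
          rw [this, PySem.Chars.isIn_eq_false_iff, List.infix_cons_iff, not_or]
          constructor
          · rw [← List.isPrefixOf_iff_prefix]; exact hp
          · rw [← PySem.Chars.isIn_eq_false_iff]
            have := ih h1 (by simp at hl; omega)
            rwa [e, show ([h1] : List (List Char)).getLast! = h1 from rfl] at this
        | s1 :: t2 =>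
          show PySem.Chars.isIn _ ((c :: h1) :: s1 :: t2).getLast! = false
          rw [show ((c :: h1) :: s1 :: t2).getLast! = (h1 :: s1 :: t2).getLast! by
            simp [List.getLast!]]
          rw [← e]
          apply ih
          simp at hl ⊢; omega

theorem pv_split_nil : PySem.Chars.splitOn ([] : List Char) ['\n', '\n'] = [[]] := rfl

theorem pv_split_dest (l : List Char) :
    ∃ h t, PySem.Chars.splitOn l ['\n', '\n'] = h :: t := by
  rcases hx : PySem.Chars.splitOn l ['\n','\n'] with _ | ⟨h1, t1⟩
  · exact absurd hx (pv_splitOn_ne_nil l _)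
  · exact ⟨h1, t1, rfl⟩

theorem pv_seam : ∀ (n : Nat) (x : List Char), x.length ≤ n → ∀ (s : List Char),
    PySem.Chars.splitOn (x ++ s) ['\n', '\n'] =
      (PySem.Chars.splitOn x ['\n', '\n']).dropLast ++
        PySem.Chars.splitOn ((PySem.Chars.splitOn x ['\n', '\n']).getLast! ++ s) ['\n', '\n'] := by
  intro n
  induction n with
  | zero =>
    intro x hx s
    have : x = [] := List.eq_nil_of_length_eq_zero (by omega)
    subst this
    simp [pv_split_nil]
  | succ n ih =>
    intro x hx s
    match x with
    | [] => simp [pv_split_nil]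
    | c :: t =>
      by_cases hp : (['\n', '\n'] : List Char).isPrefixOf (c :: t) = true
      · match t, hp with
        | [], hp => simp [List.isPrefixOf] at hp
        | d :: t2, hp =>
          simp [List.isPrefixOf] at hp
          obtain ⟨rfl, rfl⟩ := hp
          rw [show ('\n' :: '\n' :: t2) ++ s = '\n' :: '\n' :: (t2 ++ s) from rfl,
              pv_split_sep, pv_split_sep, ih t2 (by simp at hx; omega) s]
          obtain ⟨h1, t1, e⟩ := pv_split_dest t2
          rw [e]
          simp [List.getLast!]
      · match t with
        | [] =>
          have h1 : PySem.Chars.splitOn [c] ['\n', '\n'] = [[c]] := by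
            rw [pv_split_cons c [] hp]; rfl
          rw [h1]
          rfl
        | d :: t2 =>
          have hps : ¬ (['\n', '\n'] : List Char).isPrefixOf (c :: ((d :: t2) ++ s)) = true := by
            simp [List.isPrefixOf] at hp ⊢
            intro h1 h2; exact hp h1 h2
          rw [show (c :: d :: t2) ++ s = c :: ((d :: t2) ++ s) from rfl]
          rw [show PySem.Chars.splitOn (c :: ((d :: t2) ++ s)) ['\n', '\n'] =
                pvMapHead c (PySem.Chars.splitOn ((d :: t2) ++ s) ['\n', '\n']) from
              pv_split_cons _ _ hps]
          rw [ih (d :: t2) (by simp at hx ⊢; omega) s, pv_split_cons c (d :: t2) hp]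
          obtain ⟨h1, t1, e⟩ := pv_split_dest (d :: t2)
          rw [e]
          match t1 with
          | [] =>
            have hht : h1 = d :: t2 := pv_split_singleton _ _ e
            have hps2 : ¬ (['\n', '\n'] : List Char).isPrefixOf (c :: (h1 ++ s)) = true := by
              intro hh
              apply hps
              rw [hht] at hh
              simpa using hh
            rw [show ([h1] : List (List Char)).dropLast = [] from rfl,
                show ([h1] : List (List Char)).getLast! = h1 from rfl,
                show pvMapHead c [h1] = [c :: h1] from rfl,
                show ([c :: h1] : List (List Char)).dropLast = [] from rfl,
                show ([c :: h1] : List (List Char)).getLast! = c :: h1 from rfl,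
                List.nil_append, List.nil_append,
                show (c :: h1) ++ s = c :: (h1 ++ s) from rfl,
                pv_split_cons _ _ hps2]
          | s1 :: t2' =>
            rw [show pvMapHead c (h1 :: s1 :: t2') = (c :: h1) :: s1 :: t2' from rfl,
                show ((c :: h1) :: s1 :: t2').getLast! = (h1 :: s1 :: t2').getLast! by
                  simp [List.getLast!],
                show ((c :: h1) :: s1 :: t2').dropLast = (c :: h1) :: (s1 :: t2').dropLast from rfl,
                show (h1 :: s1 :: t2').dropLast = h1 :: (s1 :: t2').dropLast from rfl]
            simp [pvMapHead]

def pvBcore (s : List Char) : List String :=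
  (PySem.Chars.splitOn s ['\n', '\n']).dropLast.map pvStrip ++
    (if (PySem.Chars.splitOn s ['\n', '\n']).getLast! ≠ [] then
      [pvStrip (PySem.Chars.splitOn s ['\n', '\n']).getLast!] else [])

theorem pv_getLast!_append (A : List (List Char)) (h : List Char) (t : List (List Char)) :
    (A ++ h :: t).getLast! = (h :: t).getLast! := by
  induction A with
  | nil => rfl
  | cons a A ih =>
    match A with
    | [] => simp [List.getLast!]
    | b :: B => rw [show ((a :: b :: B) ++ h :: t).getLast! = ((b :: B) ++ h :: t).getLast! by simp [List.getLast!]]; exact ih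

theorem pv_Bcore_seam (x s : List Char) :
    pvBcore (x ++ s) =
      (PySem.Chars.splitOn x ['\n', '\n']).dropLast.map pvStrip ++
        pvBcore ((PySem.Chars.splitOn x ['\n', '\n']).getLast! ++ s) := by
  unfold pvBcore
  rw [pv_seam x.length x le_rfl s]
  obtain ⟨h, t, e⟩ := pv_split_dest ((PySem.Chars.splitOn x ['\n', '\n']).getLast! ++ s)
  rw [e, List.dropLast_append_of_ne_nil (by simp), pv_getLast!_append]
  simp


theorem pv_loopA : ∀ (cs : List String) (out : List String) (para : List Char),
    PySem.Chars.isIn ['\n', '\n'] para = false →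
    (let r := cs.foldl pvStepA (out, para);
      if r.2 ≠ [] then r.1 ++ [pvStrip r.2] else r.1) =
      out ++ pvBcore (para ++ cs.flatMap String.toList) := by
  intro cs
  induction cs with
  | nil =>
    intro out para hpara
    simp only [List.foldl_nil, List.flatMap_nil, List.append_nil]
    rw [show pvBcore para = (PySem.Chars.splitOn para ['\n', '\n']).dropLast.map pvStrip ++
        (if (PySem.Chars.splitOn para ['\n', '\n']).getLast! ≠ [] then
          [pvStrip (PySem.Chars.splitOn para ['\n', '\n']).getLast!] else []) from rfl,
        pv_noSep_split para hpara]
    rw [show ([para] : List (List Char)).dropLast = [] from rfl]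
    simp only [List.map_nil, List.nil_append]
    by_cases hp : para = [] <;> simp [hp, List.getLast!]
  | cons c cs ih =>
    intro out para hpara
    simp only [List.foldl_cons, List.flatMap_cons]
    by_cases hin : PySem.Chars.isIn ['\n', '\n'] (para ++ c.toList) = true
    · rw [show pvStepA (out, para) c = (out ++ (PySem.Chars.splitOn (para ++ c.toList) ['\n', '\n']).dropLast.map pvStrip,
            (PySem.Chars.splitOn (para ++ c.toList) ['\n', '\n']).getLast!) by
          simp [pvStepA, hin]]
      rw [ih _ _ (pv_last_noSep (para ++ c.toList).length _ le_rfl)]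
      rw [show para ++ (c.toList ++ cs.flatMap String.toList) = (para ++ c.toList) ++ cs.flatMap String.toList by simp,
          pv_Bcore_seam (para ++ c.toList) (List.flatMap String.toList cs)]
      rw [List.append_assoc]
    · rw [show pvStepA (out, para) c = (out, para ++ c.toList) by simp [pvStepA, hin]]
      rw [ih _ _ (by revert hin; cases PySem.Chars.isIn ['\n', '\n'] (para ++ c.toList) <;> simp),
          List.append_assoc]

theorem pv_join_nil (L : List (List Char)) : PySem.Chars.join [] L = L.flatten := by
  show List.intercalate [] L = L.flatten
  induction L with
  | nil => rfl
  | cons a L ih =>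
    match L with
    | [] => simp [List.intercalate]
    | b :: M =>
      rw [show List.intercalate [] (a :: b :: M) = a ++ List.intercalate [] (b :: M) by
        simp [List.intercalate, List.intersperse]]
      rw [ih]
      simp


-- ===== VERDICT (by name: the statement is the Claim_ definition above) =====
theorem paragraph_generator_spec : Claim_equal_paragraph_generator := by
  intro ts _
  unfold Spec_paragraph_generator paragraph_generator paragraph_generator_alt
  have h := pv_loopA ts [] [] (by decide)
  simp only [List.nil_append] at h
  rw [h]
  have hj : PySem.Chars.join [] (ts.map String.toList) = ts.flatMap String.toList := by
    rw [pv_join_nil]; simp [List.flatMap_def]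
  rw [hj]
  rfl
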